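-- pv_equiv track=rewrite | github.com/abd1bayev/Python-and-Data-Science-through-the-Qwasar-platform | Data_Science_Qwasar_Platform/Exercises/alpha_mirror.py | alpha_mirror
-- ===== SOURCE A (Python) =====
-- def alpha_mirror(param_1):
-- 	a = "zyxwvutsrqponmlkjihgfedcbaZYXWVUTSRQPONMLKJIHGFEDCBA ."
-- 	b = "abcdefghijklmnopqrstuvwxyzABCDEFGHIJKLMNOPQRSTUVWXYZ ."
-- 	res = ""
--
-- 	for i in param_1:
-- 		if i in a:
-- 			index = a.index(i)
-- 			res += b[index]
-- 	return (res)
-- ===== SOURCE B (Python) =====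
-- def alpha_mirror(param_1):
--     out = []
--     for c in param_1:
--         if 'a' <= c <= 'z':
--             out.append(chr(219 - ord(c)))      # ord('a')+ord('z') = 219
--         elif 'A' <= c <= 'Z':
--             out.append(chr(155 - ord(c)))      # ord('A')+ord('Z') = 155
--         elif c == ' ' or c == '.':
--             out.append(c)
--     return ''.join(out)
-- ===== Notes on version B (the rewrite author's own statement) =====
-- stated objective: idiomatic
-- what changed: Replaces the reversed-alphabet table and per-character linear a.index scan (plus quadratic string +=) by a computed arithmetic mirror (chr(219-ord(c)) / chr(155-ord(c))) with range tests, collecting pieces in a list joined once.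
import Mathlib
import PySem

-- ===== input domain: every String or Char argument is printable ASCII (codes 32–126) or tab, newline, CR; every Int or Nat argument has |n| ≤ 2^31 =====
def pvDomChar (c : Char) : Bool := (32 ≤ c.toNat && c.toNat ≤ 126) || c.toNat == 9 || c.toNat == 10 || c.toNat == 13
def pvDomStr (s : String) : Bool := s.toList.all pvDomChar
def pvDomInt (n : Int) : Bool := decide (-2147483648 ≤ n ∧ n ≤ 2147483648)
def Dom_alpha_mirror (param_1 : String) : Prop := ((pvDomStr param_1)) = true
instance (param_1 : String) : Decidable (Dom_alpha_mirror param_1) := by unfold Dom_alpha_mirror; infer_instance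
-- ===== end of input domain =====

-- ===== PORT A =====
-- B replaces A's reversed-alphabet table + per-character a.index scan by a computed
-- arithmetic mirror; idiomatic rewrite, same return value.
-- (Python iterates the string as 1-char strings; 'i in a' / 'a.index(i)' on a 1-char i
-- are exactly char membership / first char index, ported as such.)
def alpha_mirror (param_1 : String) : String :=
  let a := "zyxwvutsrqponmlkjihgfedcbaZYXWVUTSRQPONMLKJIHGFEDCBA .".toList
  let b := "abcdefghijklmnopqrstuvwxyzABCDEFGHIJKLMNOPQRSTUVWXYZ .".toList
  String.ofList (param_1.toList.foldl (fun res i =>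
    if a.contains i then
      res ++ [PySem.List.pyGetD b (((PySem.List.index? a i).getD 0 : Nat) : Int) ' ']
    else res) [])

-- ===== PORT B =====
def pvMirrorChar (c : Char) : List Char :=
  if 'a' ≤ c ∧ c ≤ 'z' then [Char.ofNat (219 - c.toNat)]
  else if 'A' ≤ c ∧ c ≤ 'Z' then [Char.ofNat (155 - c.toNat)]
  else if c = ' ' ∨ c = '.' then [c]
  else []

def alpha_mirror_alt (param_1 : String) : String :=
  String.ofList (param_1.toList.flatMap pvMirrorChar)

-- ===== PRECONDITION & SPEC =====
def Spec_alpha_mirror (param_1 : String) (out : String) : Prop := out = alpha_mirror_alt param_1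
instance (param_1 : String) (out : String) : Decidable (Spec_alpha_mirror param_1 out) := by unfold Spec_alpha_mirror; infer_instance

-- ===== CLAIM (what is proved, stated in full; the proofs are below) =====
def Claim_equal_alpha_mirror : Prop := ∀ (param_1 : String), Dom_alpha_mirror param_1 → Spec_alpha_mirror param_1 (alpha_mirror param_1)

-- ===== LEMMAS AND PROOFS =====
-- A's per-character step, named for the proof.
def pvStepA (i : Char) : List Char :=
  let a := "zyxwvutsrqponmlkjihgfedcbaZYXWVUTSRQPONMLKJIHGFEDCBA .".toList
  let b := "abcdefghijklmnopqrstuvwxyzABCDEFGHIJKLMNOPQRSTUVWXYZ .".toList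
  if a.contains i then
    [PySem.List.pyGetD b (((PySem.List.index? a i).getD 0 : Nat) : Int) ' ']
  else []

set_option maxRecDepth 4096 in
theorem pvStepA_eq_mirror_ascii : ∀ n : Nat, n < 128 → pvStepA (Char.ofNat n) = pvMirrorChar (Char.ofNat n) := by
  decide

theorem pvStepA_eq_mirror (c : Char) (h : pvDomChar c = true) : pvStepA c = pvMirrorChar c := by
  have hlt : c.toNat < 128 := by
    simp [pvDomChar] at h
    omega
  have := pvStepA_eq_mirror_ascii c.toNat hlt
  simpa using this

theorem alpha_mirror_eq (param_1 : String) (h : Dom_alpha_mirror param_1) :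
    alpha_mirror param_1 = alpha_mirror_alt param_1 := by
  unfold alpha_mirror alpha_mirror_alt
  have hfold : param_1.toList.foldl (fun res i =>
      if ("zyxwvutsrqponmlkjihgfedcbaZYXWVUTSRQPONMLKJIHGFEDCBA .".toList).contains i then
        res ++ [PySem.List.pyGetD ("abcdefghijklmnopqrstuvwxyzABCDEFGHIJKLMNOPQRSTUVWXYZ .".toList)
          (((PySem.List.index? ("zyxwvutsrqponmlkjihgfedcbaZYXWVUTSRQPONMLKJIHGFEDCBA .".toList) i).getD 0 : Nat) : Int) ' ']
      else res) [] = param_1.toList.foldl (fun res i => res ++ pvStepA i) [] := by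
    apply PySem.List.foldl_congr_mem
    intro res i _
    simp only [pvStepA]
    split <;> simp
  simp only [hfold]
  rw [PySem.List.foldl_append_eq_flatMap]
  simp only [List.nil_append]
  congr 1
  apply List.flatMap_congr
  intro c hc
  have hdom : pvDomChar c = true := by
    have := h
    unfold Dom_alpha_mirror pvDomStr at this
    exact List.all_eq_true.mp this c hc
  exact pvStepA_eq_mirror c hdom

-- ===== VERDICT (by name: the statement is the Claim_ definition above) =====
theorem alpha_mirror_spec : Claim_equal_alpha_mirror := by
  intro p h
  unfold Spec_alpha_mirror
  exact alpha_mirror_eq p h
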